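-- pv_equiv track=rewrite | github.com/baojie/shiji-kb | kg/rdf/scripts/build_person_taxonomy.py | build_sub_tree
-- ===== SOURCE A (Python) =====
-- from collections import defaultdict
--
-- def build_sub_tree(flat_items):
--     """Build hierarchical tree from flat sub-class codes."""
--     all_subs = sorted(flat_items.keys())
--     parent_of = {}
--     for sub in all_subs:
--         parts = sub.split('_')
--         for i in range(len(parts)-1, 0, -1):
--             candidate = '_'.join(parts[:i])
--             if candidate in all_subs:
--                 parent_of[sub] = candidate
--                 break
--
--     children_of = defaultdict(list)
--     roots = []
--     for sub in all_subs:
--         if sub in parent_of: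
--             children_of[parent_of[sub]].append(sub)
--         else:
--             roots.append(sub)
--
--     return roots, children_of
-- ===== SOURCE B (Python) =====
-- from collections import defaultdict
--
--
-- def _trie_insert(root, parts):
--     """Insert a code's part-path into the trie, marking its final node."""
--     node = root
--     for p in parts:
--         if p not in node[1]:
--             node[1][p] = [False, {}]
--         node = node[1][p]
--     node[0] = True
--
--
-- def build_sub_tree(flat_items):
--     """Build hierarchical tree from flat sub-class codes."""
--     keys = sorted(flat_items)
--     root = [False, {}]
--     for k in keys:
--         _trie_insert(root, k.split('_'))
--
--     roots = []
--     children_of = defaultdict(list)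
--     for sub in keys:
--         parts = sub.split('_')
--         node, parent, pref = root, None, []
--         for p in parts[:-1]:
--             node = node[1][p]
--             pref.append(p)
--             if node[0]:
--                 parent = '_'.join(pref)
--         if parent is None:
--             roots.append(sub)
--         else:
--             children_of[parent].append(sub)
--     return roots, children_of
-- ===== Notes on version B (the rewrite author's own statement) =====
-- stated objective: alternative
-- what changed: Replaces A's per-key descending joined-prefix scan (an O(n) list-membership test per candidate) by a trie of nodes [marked, children] built once over each code's underscore-split parts; each key then makes a single top-down trie descent along its parts, remembering the deepest marked proper ancestor as its parent.
import Mathlib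
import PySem

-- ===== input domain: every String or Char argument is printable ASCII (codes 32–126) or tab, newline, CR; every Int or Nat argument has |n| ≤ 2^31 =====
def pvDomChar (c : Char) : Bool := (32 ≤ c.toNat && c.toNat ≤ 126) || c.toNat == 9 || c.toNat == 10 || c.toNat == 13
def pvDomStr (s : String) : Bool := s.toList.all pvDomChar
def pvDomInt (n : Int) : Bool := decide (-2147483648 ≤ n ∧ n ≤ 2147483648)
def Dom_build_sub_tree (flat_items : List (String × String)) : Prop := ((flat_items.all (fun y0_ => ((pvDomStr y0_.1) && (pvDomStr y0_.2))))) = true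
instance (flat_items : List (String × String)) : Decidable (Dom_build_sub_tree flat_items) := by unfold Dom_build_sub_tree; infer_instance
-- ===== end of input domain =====

-- B replaces A's per-key descending joined-prefix scan (a list-membership test per candidate)
-- by a trie built once over each code's underscore-split parts; each key then makes one
-- top-down descent remembering the deepest marked proper ancestor (objective: alternative).

-- ===== PORT A =====
-- inner loop of A: 'for i in range(len(parts)-1, 0, -1): candidate = "_".join(parts[:i]); if candidate in all_subs: … break'
def pvAInner (all_subs parts : List String) : List Int → Option String
  | [] => none
  | i :: rest =>
      let candidate := PySem.Str.join "_" (PySem.List.slice parts none (some i))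
      if candidate ∈ all_subs then some candidate else pvAInner all_subs parts rest

def build_sub_tree (flat_items : List (String × String)) : List String × (List (String × List String)) :=
  let all_subs := PySem.List.sorted (PySem.Dict.ofList flat_items).keys (fun x => x) false
  let parent_of := all_subs.foldl (fun (d : PySem.Dict String String) sub =>
      let parts := (PySem.Str.split? sub "_").getD []
      match pvAInner all_subs parts (PySem.List.pyRange ((parts.length : Int) - 1) 0 (-1)) with
      | some c => d.insert sub c
      | none => d) PySem.Dict.empty
  let res := all_subs.foldl (fun (acc : List String × PySem.Dict String (List String)) sub =>
      match parent_of.get? sub with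
      | some p => (acc.1, acc.2.modify p [] (fun l => l ++ [sub]))
      | none => (acc.1 ++ [sub], acc.2)) ([], PySem.Dict.empty)
  (res.1, res.2.items)

-- ===== PORT B =====
-- B's trie: a node is [marked, children]; children is an insertion-ordered map part → node
mutual
inductive PTrie where
  | node : Bool → PTrieKids → PTrie
inductive PTrieKids where
  | nil : PTrieKids
  | cons : String → PTrie → PTrieKids → PTrieKids
end

def kidsGet? : PTrieKids → String → Option PTrie
  | PTrieKids.nil, _ => none
  | PTrieKids.cons q t rest, p => if p = q then some t else kidsGet? rest p

def kidsSet : PTrieKids → String → PTrie → PTrieKids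
  | PTrieKids.nil, p, t => PTrieKids.cons p t PTrieKids.nil
  | PTrieKids.cons q u rest, p, t =>
      if p = q then PTrieKids.cons q t rest else PTrieKids.cons q u (kidsSet rest p t)

-- '_trie_insert(root, parts)': walk/extend the path, mark the final node
def trieInsert : PTrie → List String → PTrie
  | PTrie.node _ c, [] => PTrie.node true c
  | PTrie.node m c, p :: ps =>
      let child := (kidsGet? c p).getD (PTrie.node false PTrieKids.nil)
      PTrie.node m (kidsSet c p (trieInsert child ps))

def trieMark : PTrie → Bool
  | PTrie.node m _ => m

-- B's inner loop: 'for p in parts[:-1]: node = node[1][p]; pref.append(p); if node[0]: parent = "_".join(pref)'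
-- (the missing-child branch is unreachable here: every proper prefix path of an inserted key exists in the trie)
def trieWalk : PTrie → List String → List String → Option String → Option String
  | _, [], _, parent => parent
  | PTrie.node _ c, p :: ps, pref, parent =>
      match kidsGet? c p with
      | none => parent
      | some t =>
          let pref' := pref ++ [p]
          let parent' := if trieMark t then some (PySem.Str.join "_" pref') else parent
          trieWalk t ps pref' parent'

def build_sub_tree_alt (flat_items : List (String × String)) : List String × (List (String × List String)) :=
  let keys := PySem.List.sorted (PySem.Dict.ofList flat_items).keys (fun x => x) false
  let root := keys.foldl (fun t k => trieInsert t ((PySem.Str.split? k "_").getD [])) (PTrie.node false PTrieKids.nil)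
  let res := keys.foldl (fun (acc : List String × PySem.Dict String (List String)) sub =>
      let parts := (PySem.Str.split? sub "_").getD []
      match trieWalk root (PySem.List.slice parts none (some (-1))) [] none with
      | some p => (acc.1, acc.2.modify p [] (fun l => l ++ [sub]))
      | none => (acc.1 ++ [sub], acc.2)) ([], PySem.Dict.empty)
  (res.1, res.2.items)

-- ===== PRECONDITION & SPEC =====
def Spec_build_sub_tree (flat_items : List (String × String)) (out : List String × (List (String × List String))) : Prop := out = build_sub_tree_alt flat_items
instance (flat_items : List (String × String)) (out : List String × (List (String × List String))) : Decidable (Spec_build_sub_tree flat_items out) := by unfold Spec_build_sub_tree; infer_instance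

-- ===== CLAIM (what is proved, stated in full; the proofs are below) =====
def Claim_equal_build_sub_tree : Prop := ∀ (flat_items : List (String × String)), Dom_build_sub_tree flat_items → Spec_build_sub_tree flat_items (build_sub_tree flat_items)

-- ===== LEMMAS AND PROOFS =====

def sp (c : Char) : List Char → List (List Char)
  | [] => [[]]
  | a :: t => if a = c then [] :: sp c t else (sp c t).modifyHead (a :: ·)

lemma sp_ne_nil (c : Char) (l : List Char) : sp c l ≠ [] := by
  cases l with
  | nil => simp [sp]
  | cons a t =>
      by_cases h : a = c <;> simp [sp, h]
      cases htt : sp c t with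
      | nil => exact absurd htt (sp_ne_nil c t)
      | cons x xs => simp

lemma splitOn_go_eq_sp (c : Char) (fuel : Nat) (l cur : List Char) (acc : List (List Char))
    (h : l.length < fuel) :
    PySem.Chars.splitOn.go [c] fuel l cur acc =
      acc.reverse ++ (sp c l).modifyHead (cur.reverse ++ ·) := by
  induction fuel generalizing l cur acc with
  | zero => omega
  | succ n ih =>
      cases l with
      | nil => simp [PySem.Chars.splitOn.go, sp]
      | cons a t =>
          by_cases hac : a = c
          · subst hac
            have hpre : [a].isPrefixOf (a :: t) = true := by simp [List.isPrefixOf]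
            rw [PySem.Chars.splitOn.go]
            simp only [hpre, if_true]
            rw [ih _ _ _ (by simpa using Nat.lt_of_succ_lt_succ h)]
            simp only [sp, if_true]
            have : List.modifyHead (fun x => x) (sp a t) = sp a t := by
              cases sp a t <;> simp
            simp [this]
          · have hpre : [c].isPrefixOf (a :: t) = false := by
              simp [List.isPrefixOf, BEq.beq]
              intro hh; exact absurd hh.symm hac
            rw [PySem.Chars.splitOn.go]
            simp only [hpre, if_false, Bool.false_eq_true]
            rw [ih _ _ _ (by simpa using Nat.lt_of_succ_lt_succ h)]
            simp only [sp, hac, if_false]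
            rw [List.modifyHead_modifyHead]
            have : ((fun x => cur.reverse ++ x) ∘ fun x => a :: x) = fun x => (a :: cur).reverse ++ x := by
              funext x; simp
            rw [this]

lemma splitOn_eq_sp (c : Char) (s : List Char) : PySem.Chars.splitOn s [c] = sp c s := by
  rw [PySem.Chars.splitOn, splitOn_go_eq_sp c _ s [] [] (by omega)]
  have : List.modifyHead (fun x => ([] : List Char).reverse ++ x) (sp c s) = sp c s := by
    cases sp c s <;> simp
  simpa using this

lemma sp_sepfree (c : Char) (l : List Char) : ∀ p ∈ sp c l, c ∉ p := by
  induction l with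
  | nil => simp [sp]
  | cons a t ih =>
      by_cases h : a = c
      · simp only [sp, h, if_true]
        intro p hp
        rcases List.mem_cons.mp hp with rfl | hp'
        · simp
        · exact ih p hp'
      · simp only [sp, h, if_false]
        obtain ⟨x, xs, hx⟩ : ∃ x xs, sp c t = x :: xs := by
          cases hsp : sp c t with
          | nil => exact absurd hsp (sp_ne_nil c t)
          | cons x xs => exact ⟨x, xs, rfl⟩
        rw [hx]
        intro p hp
        rcases List.mem_cons.mp hp with rfl | hp'
        · have hx' : c ∉ x := ih x (hx ▸ List.mem_cons_self ..)
          simp only [List.mem_cons]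
          rintro (rfl | hc)
          · exact h rfl
          · exact hx' hc
        · exact ih p (hx ▸ List.mem_cons_of_mem _ hp')

lemma sp_join (c : Char) (l : List Char) : PySem.Chars.join [c] (sp c l) = l := by
  induction l with
  | nil => simp [sp, PySem.Chars.join, List.intercalate]
  | cons a t ih =>
      by_cases h : a = c
      · subst h
        simp only [sp, if_true]
        obtain ⟨x, xs, hx⟩ : ∃ x xs, sp a t = x :: xs := by
          cases hsp : sp a t with
          | nil => exact absurd hsp (sp_ne_nil a t)
          | cons x xs => exact ⟨x, xs, rfl⟩
        rw [hx] at ih ⊢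
        rw [PySem.Chars.join_cons_cons]
        simpa using ih
      · simp only [sp, h, if_false]
        obtain ⟨x, xs, hx⟩ : ∃ x xs, sp c t = x :: xs := by
          cases hsp : sp c t with
          | nil => exact absurd hsp (sp_ne_nil c t)
          | cons x xs => exact ⟨x, xs, rfl⟩
        rw [hx] at ih ⊢
        simp only [List.modifyHead]
        cases xs with
        | nil =>
            rw [PySem.Chars.join_singleton] at ih ⊢
            simp [ih]
        | cons y ys =>
            rw [PySem.Chars.join_cons_cons] at ih ⊢
            simp [ih]

lemma sp_of_not_mem (c : Char) (p : List Char) (h : c ∉ p) : sp c p = [p] := by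
  induction p with
  | nil => simp [sp]
  | cons a t ih =>
      have hac : a ≠ c := fun hh => h (hh ▸ List.mem_cons_self ..)
      have ht : c ∉ t := fun hh => h (List.mem_cons_of_mem _ hh)
      simp [sp, hac, ih ht]

lemma sp_append_sep (c : Char) (p r : List Char) (h : c ∉ p) :
    sp c (p ++ c :: r) = p :: sp c r := by
  induction p with
  | nil => simp [sp]
  | cons a t ih =>
      have hac : a ≠ c := fun hh => h (hh ▸ List.mem_cons_self ..)
      have ht : c ∉ t := fun hh => h (List.mem_cons_of_mem _ hh)
      simp only [List.cons_append, sp, hac, if_false, ih ht, List.modifyHead]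

lemma sp_join_inv (c : Char) (ps : List (List Char)) (hne : ps ≠ [])
    (hfree : ∀ p ∈ ps, c ∉ p) : sp c (PySem.Chars.join [c] ps) = ps := by
  induction ps with
  | nil => exact absurd rfl hne
  | cons p t ih =>
      cases t with
      | nil =>
          rw [PySem.Chars.join_singleton]
          exact sp_of_not_mem c p (hfree p (List.mem_cons_self ..))
      | cons q u =>
          rw [PySem.Chars.join_cons_cons]
          have : p ++ [c] ++ PySem.Chars.join [c] (q :: u) = p ++ c :: PySem.Chars.join [c] (q :: u) := by simp
          rw [this, sp_append_sep c _ _ (hfree p (List.mem_cons_self ..)),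
            ih (by simp) (fun x hx => hfree x (List.mem_cons_of_mem _ hx))]

def partsOf (k : String) : List String := (PySem.Str.split? k "_").getD []

lemma toList_underscore : ("_" : String).toList = ['_'] := by decide

lemma partsOf_eq (k : String) : partsOf k = (sp '_' k.toList).map String.ofList := by
  rw [partsOf, PySem.Str.split?, toList_underscore, PySem.Chars.split?]
  simp [splitOn_eq_sp]

lemma partsOf_ne_nil (k : String) : partsOf k ≠ [] := by
  rw [partsOf_eq]
  simp [sp_ne_nil]

lemma join_partsOf (k : String) : PySem.Str.join "_" (partsOf k) = k := by
  rw [partsOf_eq, PySem.Str.join, toList_underscore]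
  rw [List.map_map]
  have : (String.toList ∘ String.ofList) = id := by funext x; simp
  rw [this, List.map_id, sp_join]
  exact String.ofList_toList

lemma mem_iff_parts_eq (S : List String) (sub : String) (i : Nat) (hi : 1 ≤ i) :
    (PySem.Str.join "_" ((partsOf sub).take i) ∈ S) ↔
      ∃ k ∈ S, partsOf k = (partsOf sub).take i := by
  constructor
  · intro hmem
    refine ⟨_, hmem, ?_⟩
    -- parts of the joined prefix are the prefix again
    rw [partsOf_eq, PySem.Str.join, toList_underscore, String.toList_ofList]
    rw [partsOf_eq, ← List.map_take, List.map_map]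
    have hcomp : (String.toList ∘ String.ofList) = id := by funext x; simp
    rw [hcomp, List.map_id]
    rw [sp_join_inv '_' _ ?hne ?hfree]
    case hne =>
      have := sp_ne_nil '_' sub.toList
      intro htake
      rcases List.take_eq_nil_iff.mp htake with h1 | h2
      · omega
      · exact this h2
    case hfree =>
      intro p hp
      exact sp_sepfree '_' sub.toList p (List.mem_of_mem_take hp)
  · rintro ⟨k, hk, hparts⟩
    have : k = PySem.Str.join "_" ((partsOf sub).take i) := by
      rw [← hparts, join_partsOf]
    rwa [← this]

def lookupMarked : PTrie → List String → Bool
  | PTrie.node m _, [] => m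
  | PTrie.node _ c, p :: ps =>
      match kidsGet? c p with
      | none => false
      | some t => lookupMarked t ps

lemma kidsGet?_kidsSet : ∀ (c : PTrieKids) (q p : String) (t : PTrie),
    kidsGet? (kidsSet c q t) p = if p = q then some t else kidsGet? c p
  | PTrieKids.nil, q, p, t => by
      by_cases h : p = q <;> simp [kidsSet, kidsGet?, h]
  | PTrieKids.cons q' u rest, q, p, t => by
      by_cases hq : q = q'
      · subst hq
        by_cases h : p = q <;> simp [kidsSet, kidsGet?, h]
      · by_cases h : p = q'
        · subst h
          simp [kidsSet, hq, kidsGet?, Ne.symm hq]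
        · simp [kidsSet, hq, kidsGet?, h, kidsGet?_kidsSet rest]

lemma lookupMarked_empty (ps : List String) :
    lookupMarked (PTrie.node false PTrieKids.nil) ps = false := by
  cases ps <;> simp [lookupMarked, kidsGet?]

lemma lookupMarked_insert (qs : List String) (t : PTrie) (ps : List String) :
    lookupMarked (trieInsert t qs) ps = (decide (ps = qs) || lookupMarked t ps) := by
  induction qs generalizing t ps with
  | nil =>
      obtain ⟨m, c⟩ := t
      cases ps with
      | nil => simp [trieInsert, lookupMarked]
      | cons p ps' => simp [trieInsert, lookupMarked]
  | cons q qs' ih =>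
      obtain ⟨m, c⟩ := t
      cases ps with
      | nil => simp [trieInsert, lookupMarked]
      | cons p ps' =>
          simp only [trieInsert, lookupMarked, kidsGet?_kidsSet]
          by_cases hpq : p = q
          · subst hpq
            simp only [if_true]
            rw [ih]
            cases kidsGet? c p with
            | none =>
                simp [lookupMarked_empty]
            | some tc =>
                simp
          · simp only [hpq, if_false]
            have : decide (p :: ps' = q :: qs') = false := by
              simp [hpq]
            rw [this]
            cases hg : kidsGet? c p <;> simp

lemma lookupMarked_nil (t : PTrie) : lookupMarked t [] = trieMark t := by
  obtain ⟨m, c⟩ := t; rfl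

lemma lookupMarked_foldl_insert (l : List String) (t0 : PTrie) (ps : List String)
    (f : String → List String) :
    lookupMarked (l.foldl (fun t k => trieInsert t (f k)) t0) ps =
      (l.any (fun k => decide (f k = ps)) || lookupMarked t0 ps) := by
  induction l generalizing t0 with
  | nil => simp
  | cons k rest ih =>
      simp only [List.foldl_cons, List.any_cons]
      rw [ih, lookupMarked_insert]
      by_cases h : ps = f k
      · simp [h]
      · simp [decide_eq_false h, decide_eq_false (fun hh : f k = ps => h hh.symm)]

lemma trieWalk_eq_foldl (qs : List String) (t : PTrie) (pref : List String) (par : Option String) :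
    trieWalk t qs pref par =
      (List.range qs.length).foldl (fun par j =>
        if lookupMarked t (qs.take (j+1)) = true
        then some (PySem.Str.join "_" (pref ++ qs.take (j+1))) else par) par := by
  induction qs generalizing t pref par with
  | nil => simp [trieWalk]
  | cons p ps ih =>
      obtain ⟨m, c⟩ := t
      cases hg : kidsGet? c p with
      | none =>
          have h1 : (List.range (p :: ps).length).foldl (fun par' j =>
              if lookupMarked (PTrie.node m c) ((p :: ps).take (j+1)) = true
              then some (PySem.Str.join "_" (pref ++ (p :: ps).take (j+1))) else par') par
              = (List.range (p :: ps).length).foldl (fun (par' : Option String) _ => par') par := by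
            apply PySem.List.foldl_congr_mem
            intro acc j _
            have hLM : lookupMarked (PTrie.node m c) (p :: List.take j ps) = false := by
              simp [lookupMarked, hg]
            simp [List.take_succ_cons, hLM]
          rw [h1, PySem.List.foldl_ignore]
          simp [trieWalk, hg]
      | some t' =>
          simp only [trieWalk, hg]
          rw [List.length_cons, List.range_succ_eq_map, List.foldl_cons, List.foldl_map]
          have h0 : (p :: ps).take 1 = [p] := by simp
          rw [ih]
          apply Eq.trans (b := (List.range ps.length).foldl (fun par' j =>
            if lookupMarked t' (ps.take (j+1)) = true
            then some (PySem.Str.join "_" ((pref ++ [p]) ++ ps.take (j+1))) else par')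
            (if trieMark t' = true then some (PySem.Str.join "_" (pref ++ [p])) else par))
          · rfl
          · have harg : (if lookupMarked (PTrie.node m c) ((p :: ps).take (0+1)) = true
                then some (PySem.Str.join "_" (pref ++ (p :: ps).take (0+1))) else par)
                = (if trieMark t' = true then some (PySem.Str.join "_" (pref ++ [p])) else par) := by
              simp [h0, lookupMarked, hg, lookupMarked_nil]
            rw [← harg]
            apply PySem.List.foldl_congr_mem
            intro acc j _
            have h1 : (p :: ps).take (j+1+1) = p :: ps.take (j+1) := by simp
            have h2 : lookupMarked (PTrie.node m c) (p :: ps.take (j+1)) = lookupMarked t' (ps.take (j+1)) := by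
              simp [lookupMarked, hg]
            rw [h1, h2]
            simp

lemma foldl_last_eq_findSome?_reverse {α β : Type} (Q : α → Bool) (v : α → β)
    (l : List α) (par : Option β) :
    l.foldl (fun par i => if Q i = true then some (v i) else par) par =
      (l.reverse.findSome? (fun i => if Q i = true then some (v i) else none)).or par := by
  induction l using List.reverseRecOn generalizing par with
  | nil => simp
  | append_singleton l x ih =>
      rw [List.foldl_append, List.reverse_append]
      simp only [List.foldl_cons, List.foldl_nil, List.reverse_singleton, List.singleton_append,
        List.findSome?_cons]
      by_cases hq : Q x = true
      · simp [hq]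
      · simp only [hq, Bool.false_eq_true, if_false, Option.or]
        exact ih par

lemma pvAInner_eq_findSome? (S parts : List String) (is : List Int) :
    pvAInner S parts is = is.findSome? (fun i =>
      let candidate := PySem.Str.join "_" (PySem.List.slice parts none (some i))
      if candidate ∈ S then some candidate else none) := by
  induction is with
  | nil => rfl
  | cons i rest ih =>
      simp only [pvAInner, List.findSome?_cons]
      by_cases h : PySem.Str.join "_" (PySem.List.slice parts none (some i)) ∈ S
      · simp [h]
      · simp [h, ih]

lemma pyRange_countdown (n : Nat) :
    PySem.List.pyRange (n : Int) 0 (-1) = List.map (fun k => Int.ofNat k) ((List.range' 1 n).reverse) := by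
  induction n with
  | zero => simp [PySem.List.pyRange_neg_one_eq_nil]
  | succ k ih =>
      rw [PySem.List.pyRange_neg_one_cons (by exact_mod_cast Nat.succ_pos k)]
      have hc : ((k+1 : Nat) : Int) - 1 = (k : Int) := by push_cast; ring
      rw [hc]
      rw [List.range'_1_concat, List.reverse_append]
      simp only [List.reverse_singleton, List.singleton_append, List.map_cons]
      rw [ih]
      congr 1
      rw [Int.ofNat_eq_natCast]
      push_cast
      ring

lemma findSome?_map' {α β γ : Type} (f : α → β) (p : β → Option γ) (l : List α) :
    (l.map f).findSome? p = l.findSome? (fun x => p (f x)) := by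
  induction l with
  | nil => rfl
  | cons x t ih =>
      rw [List.map_cons, List.findSome?_cons, List.findSome?_cons]
      cases p (f x) with
      | none => exact ih
      | some b => rfl

lemma findSome?_congr_mem {α β : Type} (f g : α → Option β) (l : List α)
    (h : ∀ x ∈ l, f x = g x) : l.findSome? f = l.findSome? g := by
  induction l with
  | nil => rfl
  | cons x t ih =>
      rw [List.findSome?_cons, List.findSome?_cons, h x (List.mem_cons_self ..)]
      cases g x with
      | none => exact ih (fun y hy => h y (List.mem_cons_of_mem _ hy))
      | some b => rfl

lemma pvAInner_eq_trieWalk (S : List String) (sub : String) :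
    pvAInner S (partsOf sub)
        (PySem.List.pyRange (((partsOf sub).length : Int) - 1) 0 (-1)) =
      trieWalk (S.foldl (fun t k => trieInsert t (partsOf k)) (PTrie.node false PTrieKids.nil))
        (PySem.List.slice (partsOf sub) none (some (-1))) [] none := by
  set P := partsOf sub with hP
  set root := S.foldl (fun t k => trieInsert t (partsOf k)) (PTrie.node false PTrieKids.nil) with hroot
  have hL : 1 ≤ P.length := by
    have := partsOf_ne_nil sub
    rw [← hP] at this
    cases hp : P with
    | nil => exact absurd hp this
    | cons a t => simp
  -- A side
  have hcast : ((P.length : Int) - 1) = ((P.length - 1 : Nat) : Int) := by omega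
  rw [hcast, pvAInner_eq_findSome?, pyRange_countdown]
  -- B side
  rw [PySem.List.slice_to_neg_one, trieWalk_eq_foldl]
  have hlen : P.dropLast.length = P.length - 1 := by simp
  rw [hlen]
  set n := P.length - 1 with hn
  have hxb : (List.range n).foldl (fun par j =>
      if lookupMarked root (P.dropLast.take (j+1)) = true
      then some (PySem.Str.join "_" ([] ++ P.dropLast.take (j+1))) else par) none
      = (List.range' 1 n).foldl (fun par i =>
      if lookupMarked root (P.dropLast.take i) = true
      then some (PySem.Str.join "_" ([] ++ P.dropLast.take i)) else par) none := by
    rw [List.range'_eq_map_range, List.foldl_map]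
    apply PySem.List.foldl_congr_mem
    intro acc j _
    simp [Nat.add_comm 1 j]
  rw [hxb]
  rw [foldl_last_eq_findSome?_reverse
      (fun i => lookupMarked root (P.dropLast.take i))
      (fun i => PySem.Str.join "_" ([] ++ P.dropLast.take i)) (List.range' 1 n) none,
    Option.or_none]
  have hmain : (List.map (fun k => Int.ofNat k) ((List.range' 1 n).reverse)).findSome? (fun i =>
        let candidate := PySem.Str.join "_" (PySem.List.slice P none (some i))
        if candidate ∈ S then some candidate else none) =
      (List.range' 1 n).reverse.findSome? (fun i =>
        if lookupMarked root (P.dropLast.take i) = true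
        then some (PySem.Str.join "_" ([] ++ P.dropLast.take i)) else none) := by
    rw [findSome?_map']
    apply findSome?_congr_mem
    intro i hi
    have hi' : 1 ≤ i ∧ i < 1 + n := by
      rw [List.mem_reverse] at hi
      exact List.mem_range'_1.mp hi
    have htake : P.dropLast.take i = P.take i := by
      rw [List.dropLast_eq_take, List.take_take]
      congr 1
      omega
    have hslice : PySem.List.slice P none (some (Int.ofNat i)) = P.take i :=
      PySem.List.slice_to_natCast P i
    have hcond : lookupMarked root (P.take i) = true ↔
        PySem.Str.join "_" (P.take i) ∈ S := by
      rw [hroot, lookupMarked_foldl_insert, lookupMarked_empty, Bool.or_false,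
        List.any_eq_true, mem_iff_parts_eq S sub i hi'.1]
      constructor
      · rintro ⟨k, hk, hdk⟩
        exact ⟨k, hk, of_decide_eq_true hdk⟩
      · rintro ⟨k, hk, hdk⟩
        exact ⟨k, hk, decide_eq_true hdk⟩
    simp only [hslice, htake, List.nil_append]
    by_cases hm : PySem.Str.join "_" (P.take i) ∈ S
    · rw [if_pos hm, if_pos (hcond.mpr hm)]
    · rw [if_neg hm, if_neg (fun hh => hm (hcond.mp hh))]
  exact hmain

-- A's first loop builds a dict whose lookup is exactly the inner-scan result
lemma get?_foldl_step_not_mem (f : String → Option String) (l : List String)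
    (d : PySem.Dict String String) (x : String) (hx : x ∉ l) :
    (l.foldl (fun d sub => match f sub with
      | some c => d.insert sub c
      | none => d) d).get? x = d.get? x := by
  induction l generalizing d with
  | nil => rfl
  | cons y t ih =>
      have hxy : x ≠ y := fun h => hx (h ▸ List.mem_cons_self ..)
      have hxt : x ∉ t := fun h => hx (List.mem_cons_of_mem _ h)
      simp only [List.foldl_cons]
      rw [ih _ hxt]
      cases hf : f y with
      | none => rfl
      | some c => exact PySem.Dict.get?_insert_of_ne d c hxy

lemma get?_foldl_step_mem (f : String → Option String) (l : List String)
    (d : PySem.Dict String String) (x : String) (hx : x ∈ l) (hnd : l.Nodup) :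
    (l.foldl (fun d sub => match f sub with
      | some c => d.insert sub c
      | none => d) d).get? x =
      (match f x with | some c => some c | none => d.get? x) := by
  induction l generalizing d with
  | nil => cases hx
  | cons y t ih =>
      simp only [List.foldl_cons]
      rcases List.mem_cons.mp hx with rfl | hxt
      · have hxt : x ∉ t := (List.nodup_cons.mp hnd).1
        rw [get?_foldl_step_not_mem f t _ x hxt]
        cases hf : f x with
        | none => simp
        | some c => simp [PySem.Dict.get?_insert_self]
      · have hxy : x ≠ y := by
          rintro rfl
          exact (List.nodup_cons.mp hnd).1 hxt
        rw [ih _ hxt (List.nodup_cons.mp hnd).2]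
        cases hf : f y with
        | none => rfl
        | some c => simp [PySem.Dict.get?_insert_of_ne d c hxy]

-- the sorted key list has no duplicates
lemma nodup_sorted_keys (flat_items : List (String × String)) :
    (PySem.List.sorted (PySem.Dict.ofList flat_items).keys (fun x => x) false).Nodup := by
  have hperm := PySem.List.sorted_perm (PySem.Dict.ofList flat_items).keys (fun x : String => x) false
  rw [hperm.nodup_iff]
  have : (PySem.Dict.ofList flat_items).keys =
      PySem.Set.update (PySem.Dict.empty : PySem.Dict String String).keys (flat_items.map (·.1)) := by
    exact PySem.Dict.keys_foldl_insert_key flat_items (·.1) (fun _ kv => kv.2) PySem.Dict.empty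
  rw [this]
  have hempty : (PySem.Dict.empty : PySem.Dict String String).keys = [] := rfl
  rw [hempty, PySem.Set.update_nil_left]
  exact PySem.Set.nodup_ofList _

-- ===== VERDICT (by name: the statement is the Claim_ definition above) =====
theorem build_sub_tree_spec : Claim_equal_build_sub_tree := by
  intro flat_items _
  unfold Spec_build_sub_tree build_sub_tree build_sub_tree_alt
  simp only []
  set keys := PySem.List.sorted (PySem.Dict.ofList flat_items).keys (fun x => x) false with hkeys
  have hnd : keys.Nodup := nodup_sorted_keys flat_items
  set root := keys.foldl (fun t k => trieInsert t ((PySem.Str.split? k "_").getD []))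
    (PTrie.node false PTrieKids.nil) with hroot
  set f : String → Option String := fun sub =>
    trieWalk root (PySem.List.slice ((PySem.Str.split? sub "_").getD []) none (some (-1))) [] none with hf
  have hroot' : root = keys.foldl (fun t k => trieInsert t (partsOf k)) (PTrie.node false PTrieKids.nil) := by
    rw [hroot]; rfl
  have hinner : ∀ sub ∈ keys,
      pvAInner keys ((PySem.Str.split? sub "_").getD [])
        (PySem.List.pyRange ((((PySem.Str.split? sub "_").getD []).length : Int) - 1) 0 (-1)) = f sub := by
    intro sub hsub
    have h := pvAInner_eq_trieWalk keys sub
    rw [hf, hroot']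
    exact h
  have hdict : ∀ sub ∈ keys,
      (keys.foldl (fun (d : PySem.Dict String String) sub =>
        match pvAInner keys ((PySem.Str.split? sub "_").getD [])
          (PySem.List.pyRange ((((PySem.Str.split? sub "_").getD []).length : Int) - 1) 0 (-1)) with
        | some c => d.insert sub c
        | none => d) PySem.Dict.empty).get? sub = f sub := by
    intro sub hsub
    have hstep : keys.foldl (fun (d : PySem.Dict String String) sub =>
        match pvAInner keys ((PySem.Str.split? sub "_").getD [])
          (PySem.List.pyRange ((((PySem.Str.split? sub "_").getD []).length : Int) - 1) 0 (-1)) with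
        | some c => d.insert sub c
        | none => d) PySem.Dict.empty = keys.foldl (fun (d : PySem.Dict String String) sub =>
        match f sub with
        | some c => d.insert sub c
        | none => d) PySem.Dict.empty := by
      apply PySem.List.foldl_congr_mem
      intro d s hs
      rw [hinner s hs]
    rw [hstep, get?_foldl_step_mem f keys _ sub hsub hnd]
    cases hfs : f sub with
    | none => simp [PySem.Dict.get?_empty]
    | some c => rfl
  congr 1
  · apply congrArg
    apply PySem.List.foldl_congr_mem
    intro acc sub hsub
    rw [hdict sub hsub]
  · apply congrArg
    apply congrArg
    apply PySem.List.foldl_congr_mem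
    intro acc sub hsub
    rw [hdict sub hsub]
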